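-- pv_equiv track=rewrite | github.com/usorama/engg-support-system | veracity-engine/core/build_graph.py | _extract_comment_above
-- ===== SOURCE A (Python) =====
-- def _extract_comment_above(lines: list, line_idx: int) -> str:
--     """Extract JSDoc/comment block above a line."""
--     comments = []
--     idx = line_idx - 1
--
--     while idx >= 0:
--         line = lines[idx].strip()
--         if line.startswith('//'):
--             comments.insert(0, line[2:].strip())
--         elif line.startswith('*') or line.startswith('/*') or line.startswith('/**'):
--             comments.insert(0, line.lstrip('/*').rstrip('*/').strip())
--         elif line == '':
--             idx -= 1
--             continue
--         else:
--             break
--         idx -= 1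
--
--     return ' '.join(comments) if comments else ""
-- ===== SOURCE B (Python) =====
-- def _extract_comment_above(lines: list, line_idx: int) -> str:
--     """Extract JSDoc/comment block above a line (two-phase: find block start, then collect forward)."""
--
--     def _comment_text(t):
--         # t is already stripped; returns the comment's text, or None if t is not a comment line
--         if t.startswith('//'):
--             return t[2:].strip()
--         if t.startswith('*') or t.startswith('/*'):
--             return t.lstrip('/*').rstrip('*/').strip()
--         return None
--
--     # Phase 1: scan upward to find where the comment/blank block starts
--     start = line_idx
--     while start > 0:
--         t = lines[start - 1].strip()
--         if t == '' or _comment_text(t) is not None: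
--             start -= 1
--         else:
--             break
--
--     # Phase 2: collect the comment text forward, in natural order
--     parts = []
--     for i in range(start, line_idx):
--         t = lines[i].strip()
--         if t == '':
--             continue
--         c = _comment_text(t)
--         if c is not None:
--             parts.append(c)
--
--     return ' '.join(parts)
-- ===== Notes on version B (the rewrite author's own statement) =====
-- stated objective: alternative
-- what changed: A makes one reverse scan that builds the result list by repeated insert(0); B first finds the block's start boundary scanning upward without accumulating, then collects the comment text in a forward pass with append, joined in natural order.
import Mathlib
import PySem

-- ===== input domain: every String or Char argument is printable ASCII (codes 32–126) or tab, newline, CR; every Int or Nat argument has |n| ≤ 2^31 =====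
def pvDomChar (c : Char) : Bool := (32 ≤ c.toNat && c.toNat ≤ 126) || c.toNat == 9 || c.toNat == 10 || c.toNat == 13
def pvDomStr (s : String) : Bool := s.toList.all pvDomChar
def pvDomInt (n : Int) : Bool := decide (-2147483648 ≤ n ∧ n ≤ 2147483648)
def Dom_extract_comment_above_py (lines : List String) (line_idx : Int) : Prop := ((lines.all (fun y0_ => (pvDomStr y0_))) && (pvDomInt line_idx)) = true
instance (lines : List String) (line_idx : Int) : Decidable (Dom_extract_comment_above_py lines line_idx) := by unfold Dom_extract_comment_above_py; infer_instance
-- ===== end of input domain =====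

-- B replaces A's reverse scan with insert(0) by a two-phase pass: find the block start, then collect forward (alternative decomposition, same behaviour).


-- shared primitive: exact port of Python's str.lstrip(chars) / str.rstrip(chars)
-- (PySem has no one-sided chars-strip; both Pythons call these builtins)
def pvLstripSet (cs : List Char) (chars : List Char) : List Char :=
  cs.dropWhile (fun c => chars.contains c)
def pvRstripSet (cs : List Char) (chars : List Char) : List Char :=
  (cs.reverse.dropWhile (fun c => chars.contains c)).reverse

-- ===== PORT A =====
-- the while-loop of A: fuel n means current index is n-1 (loop exits when idx < 0);
-- comments is the accumulated list, new entries inserted at the front (insert(0, …))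
def pvALoop (lines : List String) : Nat → List (List Char) → List (List Char)
  | 0, comments => comments
  | (i+1), comments =>
    let line := PySem.Chars.strip (PySem.List.pyGetD lines (i : Int) "").toList
    if PySem.Chars.startswith line ['/', '/'] then
      pvALoop lines i (PySem.Chars.strip (PySem.List.slice line (some 2) none) :: comments)
    else if PySem.Chars.startswith line ['*'] || PySem.Chars.startswith line ['/', '*']
         || PySem.Chars.startswith line ['/', '*', '*'] then
      pvALoop lines i (PySem.Chars.strip (pvRstripSet (pvLstripSet line ['/', '*']) ['*', '/']) :: comments)
    else if line = [] then
      pvALoop lines i comments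
    else
      comments

def extract_comment_above_py (lines : List String) (line_idx : Int) : String :=
  let comments := pvALoop lines line_idx.toNat []
  if comments = [] then "" else String.ofList (PySem.Chars.join [' '] comments)

-- ===== PORT B =====
-- Source B's _comment_text: t already stripped; none = not a comment line
def pvCommentText? (t : List Char) : Option (List Char) :=
  if PySem.Chars.startswith t ['/', '/'] then
    some (PySem.Chars.strip (PySem.List.slice t (some 2) none))
  else if PySem.Chars.startswith t ['*'] || PySem.Chars.startswith t ['/', '*'] then
    some (PySem.Chars.strip (pvRstripSet (pvLstripSet t ['/', '*']) ['*', '/']))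
  else none

-- Phase 1 of Source B: while start > 0 walk upward while the line above is blank or a comment
def pvFindStart (lines : List String) : Nat → Nat
  | 0 => 0
  | (s+1) =>
    let t := PySem.Chars.strip (PySem.List.pyGetD lines (s : Int) "").toList
    if t = [] || (pvCommentText? t).isSome then pvFindStart lines s else s + 1

def extract_comment_above_py_alt (lines : List String) (line_idx : Int) : String :=
  let start : Int := (pvFindStart lines line_idx.toNat : Int)
  let parts := (PySem.List.pyRange start line_idx 1).foldl
    (fun acc i =>
      let t := PySem.Chars.strip (PySem.List.pyGetD lines i "").toList
      if t = [] then acc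
      else match pvCommentText? t with
        | some c => acc ++ [c]
        | none => acc) []
  String.ofList (PySem.Chars.join [' '] parts)

-- ===== PRECONDITION & SPEC =====
-- Pre_ excludes exactly the inputs where Python A raises IndexError (lines[line_idx-1] past the end)
def Pre_extract_comment_above_py (lines : List String) (line_idx : Int) : Prop :=
  line_idx ≤ lines.length
instance (lines : List String) (line_idx : Int) : Decidable (Pre_extract_comment_above_py lines line_idx) := by unfold Pre_extract_comment_above_py; infer_instance

def pvWitness_extract_comment_above_py : List String × Int := (["// hello", " * world */", "code();"], 2)

def Spec_extract_comment_above_py (lines : List String) (line_idx : Int) (out : String) : Prop := out = extract_comment_above_py_alt lines line_idx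
instance (lines : List String) (line_idx : Int) (out : String) : Decidable (Spec_extract_comment_above_py lines line_idx out) := by unfold Spec_extract_comment_above_py; infer_instance

-- ===== CLAIM (what is proved, stated in full; the proofs are below) =====
def Claim_equal_extract_comment_above_py : Prop := ∀ (lines : List String) (line_idx : Int), Dom_extract_comment_above_py lines line_idx → Pre_extract_comment_above_py lines line_idx → Spec_extract_comment_above_py lines line_idx (extract_comment_above_py lines line_idx)

-- ===== LEMMAS AND PROOFS =====

-- stripped text of line i
def pvT (lines : List String) (i : Nat) : List Char :=
  PySem.Chars.strip (lines.getD i "").toList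

-- forward-collected comment texts over indices [s, n)
def pvParts (lines : List String) (s n : Nat) : List (List Char) :=
  (List.range' s (n - s)).filterMap (fun i => pvCommentText? (pvT lines i))

theorem pvFindStart_le (lines : List String) : ∀ n, pvFindStart lines n ≤ n := by
  intro n
  induction n with
  | zero => simp [pvFindStart]
  | succ i ih =>
    simp only [pvFindStart]
    split
    · omega
    · omega

theorem pvCommentText?_nil : pvCommentText? [] = none := by decide

-- A's step classification equals B's _comment_text (the redundant '/**' disjunct collapses)
theorem pvStartswith_collapse (t : List Char) :
    (PySem.Chars.startswith t ['*'] || PySem.Chars.startswith t ['/', '*']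
      || PySem.Chars.startswith t ['/', '*', '*'])
    = (PySem.Chars.startswith t ['*'] || PySem.Chars.startswith t ['/', '*']) := by
  by_cases h : PySem.Chars.startswith t ['/', '*', '*'] = true
  · have h2 : PySem.Chars.startswith t ['/', '*'] = true := by
      rw [PySem.Chars.startswith_iff] at h ⊢
      exact List.IsPrefix.trans ⟨['*'], rfl⟩ h
    simp [h, h2]
  · simp [Bool.eq_false_iff.mpr h]

-- one step of A's loop, phrased through B's classifier
theorem pvALoop_step (lines : List String) (i : Nat) (comments : List (List Char)) :
    pvALoop lines (i+1) comments
    = (match pvCommentText? (pvT lines i) with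
       | some c => pvALoop lines i (c :: comments)
       | none => if pvT lines i = [] then pvALoop lines i comments else comments) := by
  have hT : PySem.Chars.strip (PySem.List.pyGetD lines (i : Int) "").toList = pvT lines i := by
    simp [pvT, PySem.List.pyGetD_natCast]
  simp only [pvALoop, hT]
  by_cases h1 : PySem.Chars.startswith (pvT lines i) ['/', '/'] = true
  · have hc : pvCommentText? (pvT lines i)
        = some (PySem.Chars.strip (PySem.List.slice (pvT lines i) (some 2) none)) := by
      simp [pvCommentText?, h1]
    simp [h1, hc]
  · by_cases h2 : (PySem.Chars.startswith (pvT lines i) ['*']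
        || PySem.Chars.startswith (pvT lines i) ['/', '*']
        || PySem.Chars.startswith (pvT lines i) ['/', '*', '*']) = true
    · have h2' : (PySem.Chars.startswith (pvT lines i) ['*']
          || PySem.Chars.startswith (pvT lines i) ['/', '*']) = true := by
        rw [← pvStartswith_collapse]; exact h2
      have hc : pvCommentText? (pvT lines i)
          = some (PySem.Chars.strip (pvRstripSet (pvLstripSet (pvT lines i) ['/', '*']) ['*', '/'])) := by
        simp [pvCommentText?, Bool.eq_false_iff.mpr h1, h2']
      simp [Bool.eq_false_iff.mpr h1, h2, hc]
    · have h2' : (PySem.Chars.startswith (pvT lines i) ['*']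
          || PySem.Chars.startswith (pvT lines i) ['/', '*']) ≠ true := by
        rw [← pvStartswith_collapse]; exact h2
      have hc : pvCommentText? (pvT lines i) = none := by
        simp [pvCommentText?, Bool.eq_false_iff.mpr h1, Bool.eq_false_iff.mpr h2']
      simp [Bool.eq_false_iff.mpr h1, Bool.eq_false_iff.mpr h2, hc]

-- one step of B's boundary search
theorem pvFindStart_step (lines : List String) (i : Nat) :
    pvFindStart lines (i+1)
    = if (pvT lines i = [] ∨ (pvCommentText? (pvT lines i)).isSome = true)
      then pvFindStart lines i else i + 1 := by
  have hT : PySem.Chars.strip (PySem.List.pyGetD lines (i : Int) "").toList = pvT lines i := by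
    simp [pvT, PySem.List.pyGetD_natCast]
  simp only [pvFindStart, hT]
  by_cases h : (pvT lines i = [] ∨ (pvCommentText? (pvT lines i)).isSome = true)
  · rcases h with h | h <;> simp [h]
  · push_neg at h
    simp [h.1, h.2]

theorem pvParts_self (lines : List String) (n : Nat) : pvParts lines n n = [] := by
  simp [pvParts]

theorem pvParts_snoc (lines : List String) (s i : Nat) (hs : s ≤ i) :
    pvParts lines s (i+1) = pvParts lines s i ++ (pvCommentText? (pvT lines i)).toList := by
  unfold pvParts
  have h1 : i + 1 - s = (i - s) + 1 := by omega
  rw [h1, List.range'_1_concat, List.filterMap_append]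
  have h2 : s + (i - s) = i := by omega
  cases hc : pvCommentText? (pvT lines i) <;> simp [h2, hc, Option.toList]

-- the loop invariant: A's reverse scan with insert(0) equals B's boundary + forward collection
theorem pvALoop_eq (lines : List String) :
    ∀ n comments, pvALoop lines n comments
      = pvParts lines (pvFindStart lines n) n ++ comments := by
  intro n
  induction n with
  | zero => intro comments; simp [pvALoop, pvFindStart, pvParts]
  | succ i ih =>
    intro comments
    have hle : pvFindStart lines i ≤ i := pvFindStart_le lines i
    rw [pvALoop_step, pvFindStart_step]
    cases hc : pvCommentText? (pvT lines i) with
    | some c =>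
      simp [hc, ih, pvParts_snoc lines _ i hle]
    | none =>
      by_cases h3 : pvT lines i = []
      · simp [hc, h3, ih, pvParts_snoc lines _ i hle, pvCommentText?_nil]
      · simp [hc, h3, pvParts_self]

-- B's foldl body agrees pointwise with filterMap of _comment_text (a blank line maps to none)
theorem pvFoldl_eq_filterMap (lines : List String) (L : List Int) (acc : List (List Char)) :
    L.foldl (fun acc i =>
      let t := PySem.Chars.strip (PySem.List.pyGetD lines i "").toList
      if t = [] then acc
      else match pvCommentText? t with
        | some c => acc ++ [c]
        | none => acc) acc
    = acc ++ L.filterMap (fun i => pvCommentText? (PySem.Chars.strip (PySem.List.pyGetD lines i "").toList)) := by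
  induction L generalizing acc with
  | nil => simp
  | cons x xs ih =>
    simp only [List.foldl_cons, List.filterMap_cons]
    by_cases h0 : PySem.Chars.strip (PySem.List.pyGetD lines x "").toList = []
    · have hn : pvCommentText? (PySem.Chars.strip (PySem.List.pyGetD lines x "").toList) = none := by
        rw [h0]; exact pvCommentText?_nil
      simp only [h0, if_true, hn, ih]
      simp [pvCommentText?_nil]
    · simp only [h0, if_false]
      cases hc : pvCommentText? (PySem.Chars.strip (PySem.List.pyGetD lines x "").toList) with
      | none => simp only [hc, ih]
      | some c => simp only [hc, ih]; simp

-- ===== VERDICT (by name: the statement is the Claim_ definition above) =====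
theorem extract_comment_above_py_spec : Claim_equal_extract_comment_above_py := by
  intro lines line_idx _hdom _hpre
  unfold Spec_extract_comment_above_py extract_comment_above_py extract_comment_above_py_alt
  simp only [pvALoop_eq, pvFoldl_eq_filterMap, List.append_nil, List.nil_append]
  by_cases hpos : 0 < line_idx
  · have hn : line_idx = (line_idx.toNat : Int) := by omega
    set s := pvFindStart lines line_idx.toNat with hs
    have hsle : s ≤ line_idx.toNat := pvFindStart_le lines line_idx.toNat
    have hrw : (PySem.List.pyRange (s : Int) line_idx 1).filterMap
          (fun i => pvCommentText? (PySem.Chars.strip (PySem.List.pyGetD lines i "").toList))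
        = pvParts lines s line_idx.toNat := by
      rw [hn, PySem.List.pyRange_one]
      have hcast : ((line_idx.toNat : Int) - (s : Int)).toNat = line_idx.toNat - s := by omega
      rw [hcast]
      unfold pvParts
      rw [List.range'_eq_map_range, List.filterMap_map, List.filterMap_map]
      apply List.filterMap_congr
      intro k _
      have hk : (s : Int) + (k : Int) = ((s + k : Nat) : Int) := by push_cast; ring
      simp only [Function.comp_apply]
      rw [hk]
      simp only [PySem.List.pyGetD_natCast, pvT]
    rw [hrw]
    by_cases he : pvParts lines s line_idx.toNat = []
    · rw [if_pos he, he]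
      decide
    · rw [if_neg he]
  · have hz : line_idx.toNat = 0 := by omega
    simp only [hz]
    have h0 : pvFindStart lines 0 = 0 := rfl
    have hnil : PySem.List.pyRange ((pvFindStart lines 0 : Nat) : Int) line_idx 1 = [] := by
      apply PySem.List.pyRange_one_eq_nil
      rw [h0]; omega
    rw [hnil, h0, pvParts_self]
    simp only [List.filterMap_nil, List.nil_append, if_pos rfl]
    decide
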